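-- pv_equiv track=rewrite | github.com/The5cheduler/Data-Structure-and-Algorithms | patterns/patterns.py | pattern_1
-- ===== SOURCE A (Python) =====
-- def pattern_1(n:int) -> str:
--     result = ""
--     #  method 1
--     for i in range(n):
--         if i == n - 1:
--             result = result + ("* " * n)
--         else:
--             result = result + ("* " * n) + "\n"
--
--     #  method 2
--     for i in range(n):
--         for j in range(n):
--             result = result + "*" + " "
--         if i != n - 1:
--             result = result + "\n"
--
--     return result
-- ===== SOURCE B (Python) =====
-- def pattern_1(n: int) -> str:
--     row = "* " * n
--     block = "\n".join([row] * n)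
--     return block * 2
-- ===== Notes on version B (the rewrite author's own statement) =====
-- stated objective: simpler
-- what changed: A builds the square twice with two different accumulating loops (string repetition with a last-row test, then nested char-by-char appends); B builds one row, joins n copies once, and doubles the block, avoiding A's repeated re-copying of the growing result string.
import Mathlib
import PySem

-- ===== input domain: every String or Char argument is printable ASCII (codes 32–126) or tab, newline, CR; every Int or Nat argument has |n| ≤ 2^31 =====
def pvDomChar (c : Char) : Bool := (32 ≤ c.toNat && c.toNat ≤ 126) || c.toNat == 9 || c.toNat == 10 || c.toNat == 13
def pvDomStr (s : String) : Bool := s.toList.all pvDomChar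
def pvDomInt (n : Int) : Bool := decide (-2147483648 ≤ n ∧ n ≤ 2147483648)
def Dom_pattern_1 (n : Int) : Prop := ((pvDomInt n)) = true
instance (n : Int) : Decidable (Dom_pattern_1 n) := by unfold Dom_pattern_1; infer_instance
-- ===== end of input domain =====

-- B builds one row, joins n copies once, and doubles it; A builds the same square twice with two different loops.

-- ===== PORT A =====
-- result is kept as a List Char; String.ofList wraps it at the return (Lean's String.append is kernel-opaque).
def pattern_1 (n : Int) : String :=
  let result : List Char := []
  --  method 1
  let result := (PySem.List.pyRange 0 n 1).foldl (fun result i =>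
      if i == n - 1 then result ++ PySem.List.pyRepeat ['*', ' '] n
      else result ++ PySem.List.pyRepeat ['*', ' '] n ++ ['\n']) result
  --  method 2
  let result := (PySem.List.pyRange 0 n 1).foldl (fun result i =>
      let result := (PySem.List.pyRange 0 n 1).foldl
          (fun result _ => result ++ ['*'] ++ [' ']) result
      if i != n - 1 then result ++ ['\n'] else result) result
  String.ofList result

-- ===== PORT B =====
def pattern_1_alt (n : Int) : String :=
  let row := PySem.List.pyRepeat ['*', ' '] n
  let block := PySem.Chars.join ['\n'] (PySem.List.pyRepeat [row] n)
  String.ofList (PySem.List.pyRepeat block 2)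

-- ===== PRECONDITION & SPEC =====
def Spec_pattern_1 (n : Int) (out : String) : Prop := out = pattern_1_alt n
instance (n : Int) (out : String) : Decidable (Spec_pattern_1 n out) := by unfold Spec_pattern_1; infer_instance

-- ===== CLAIM (what is proved, stated in full; the proofs are below) =====
def Claim_equal_pattern_1 : Prop := ∀ (n : Int), Dom_pattern_1 n → Spec_pattern_1 n (pattern_1 n)

-- ===== LEMMAS AND PROOFS =====

-- the block: k rows joined by newlines
def joinRows (row : List Char) : Nat → List Char
  | 0 => []
  | k + 1 => row ++ (if k = 0 then [] else '\n' :: joinRows row k)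

lemma joinRows_eq_join (row : List Char) (k : Nat) :
    joinRows row k = PySem.Chars.join ['\n'] (List.replicate k row) := by
  induction k with
  | zero => simp [joinRows, PySem.Chars.join, List.intercalate]
  | succ m ih =>
    cases m with
    | zero => simp [joinRows, PySem.Chars.join, List.intercalate]
    | succ m' =>
      simp only [joinRows] at ih ⊢
      rw [if_neg (Nat.succ_ne_zero m'), ih]
      simp [PySem.Chars.join, List.intercalate, List.replicate_succ]

-- A's row loop (both methods reduce to this shape): folding from a to n appends the remaining rows
lemma loopA (row : List Char) (n : Int) (k : Nat) :
    ∀ (a : Int) (init : List Char), a + (k : Int) = n →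
      (PySem.List.pyRange a n 1).foldl
        (fun res i => if i == n - 1 then res ++ row else res ++ row ++ ['\n']) init
      = init ++ joinRows row k := by
  induction k with
  | zero =>
    intro a init h
    rw [PySem.List.pyRange_one_eq_nil (by omega)]
    simp [joinRows]
  | succ m ih =>
    intro a init h
    rw [PySem.List.pyRange_one_cons (by omega)]
    simp only [List.foldl_cons]
    cases m with
    | zero =>
      have ha : (a == n - 1) = true := by simp; omega
      rw [PySem.List.pyRange_one_eq_nil (by omega)]
      simp [ha, joinRows]
    | succ m' =>
      have ha : (a == n - 1) = false := by simp; omega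
      rw [ha]
      simp only [Bool.false_eq_true, if_false]
      rw [ih (a + 1) _ (by omega)]
      simp [joinRows]

-- method 2's inner loop: appending "*"+" " once per element of any list
lemma innerLoop (l : List Int) :
    ∀ (init : List Char),
      l.foldl (fun res _ => res ++ ['*'] ++ [' ']) init
      = init ++ (List.replicate l.length ['*', ' ']).flatten := by
  induction l with
  | nil => intro init; simp
  | cons x xs ih =>
    intro init
    simp only [List.foldl_cons, List.length_cons, List.replicate_succ, List.flatten_cons]
    rw [ih]
    simp

theorem pattern_1_eq (n : Int) : pattern_1 n = pattern_1_alt n := by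
  unfold pattern_1 pattern_1_alt
  simp only []
  have hrep : PySem.List.pyRepeat ['*', ' '] n
      = (List.replicate (PySem.List.pyRange 0 n 1).length ['*', ' ']).flatten := by
    simp [PySem.List.pyRepeat, PySem.List.length_pyRange_one]
  by_cases hn : 0 ≤ n
  · have h1 := loopA (PySem.List.pyRepeat ['*', ' '] n) n n.toNat 0 [] (by omega)
    have h2 : (PySem.List.pyRange 0 n 1).foldl
        (fun result i =>
          if i != n - 1 then
            ((PySem.List.pyRange 0 n 1).foldl (fun result _ => result ++ ['*'] ++ [' ']) result) ++ ['\n']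
          else
            (PySem.List.pyRange 0 n 1).foldl (fun result _ => result ++ ['*'] ++ [' ']) result)
        (joinRows (PySem.List.pyRepeat ['*', ' '] n) n.toNat)
        = joinRows (PySem.List.pyRepeat ['*', ' '] n) n.toNat
          ++ joinRows (PySem.List.pyRepeat ['*', ' '] n) n.toNat := by
      have hcongr : (PySem.List.pyRange 0 n 1).foldl
          (fun result i =>
            if i != n - 1 then
              ((PySem.List.pyRange 0 n 1).foldl (fun result _ => result ++ ['*'] ++ [' ']) result) ++ ['\n']
            else
              (PySem.List.pyRange 0 n 1).foldl (fun result _ => result ++ ['*'] ++ [' ']) result)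
          (joinRows (PySem.List.pyRepeat ['*', ' '] n) n.toNat)
          = (PySem.List.pyRange 0 n 1).foldl
          (fun res i => if i == n - 1 then res ++ PySem.List.pyRepeat ['*', ' '] n
                        else res ++ PySem.List.pyRepeat ['*', ' '] n ++ ['\n'])
          (joinRows (PySem.List.pyRepeat ['*', ' '] n) n.toNat) := by
        apply PySem.List.foldl_congr_mem
        intro res i _
        rw [innerLoop (PySem.List.pyRange 0 n 1) res, ← hrep]
        by_cases hi : i = n - 1
        · simp [hi]
        · simp [hi]
      rw [hcongr, loopA (PySem.List.pyRepeat ['*', ' '] n) n n.toNat 0 _ (by omega)]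
    simp only [h1, List.nil_append] at *
    rw [h2]
    have hb : PySem.List.pyRepeat
        [PySem.List.pyRepeat ['*', ' '] n] n = List.replicate n.toNat (PySem.List.pyRepeat ['*', ' '] n) :=
      PySem.List.pyRepeat_singleton _ n
    rw [hb, ← joinRows_eq_join]
    simp [PySem.List.pyRepeat]
  · rw [PySem.List.pyRange_one_eq_nil (by omega)]
    have hz : n.toNat = 0 := by omega
    simp [PySem.List.pyRepeat, hz, PySem.Chars.join, List.intercalate]

-- ===== VERDICT (by name: the statement is the Claim_ definition above) =====
theorem pattern_1_spec : Claim_equal_pattern_1 := by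
  intro n _
  exact pattern_1_eq n
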